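-- pv_equiv track=rewrite | github.com/GenryEden/kpolyakovName | 406.py | f
-- ===== SOURCE A (Python) =====
-- def f(x):
-- 	l = 0
-- 	m = 1
-- 	while x > 0:
-- 		l += 1
-- 		m *= (x%8)
-- 		x //= 8
-- 	return l, m
-- ===== SOURCE B (Python) =====
-- def f(x):
--     if x <= 0:
--         return (0, 1)
--     s = oct(x)[2:]
--     m = 1
--     for c in s:
--         m *= int(c)
--     return (len(s), m)
-- ===== Notes on version B (the rewrite author's own statement) =====
-- stated objective: idiomatic
-- what changed: B builds the full octal representation first via oct() and then derives the count as its length (closed form, no counter) and the product by one pass over its characters, instead of extracting digits one at a time with arithmetic while maintaining two accumulators.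
import Mathlib
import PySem

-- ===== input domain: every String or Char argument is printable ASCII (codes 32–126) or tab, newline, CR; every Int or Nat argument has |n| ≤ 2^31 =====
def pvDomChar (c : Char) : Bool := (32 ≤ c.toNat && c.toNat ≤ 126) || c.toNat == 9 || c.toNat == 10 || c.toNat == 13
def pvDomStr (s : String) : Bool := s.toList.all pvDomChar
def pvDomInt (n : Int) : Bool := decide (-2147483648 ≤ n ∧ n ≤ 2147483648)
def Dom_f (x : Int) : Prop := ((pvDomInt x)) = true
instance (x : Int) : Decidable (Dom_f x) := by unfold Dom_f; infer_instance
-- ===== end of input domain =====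

-- B builds the octal digit list first and derives count (length) and product from it,
-- instead of A's single while-loop maintaining two accumulators; same cost, more idiomatic.

-- ===== PORT A =====
-- the while loop of A: state (x, l, m)
def fLoop (x l m : Int) : Int × Int :=
  if h : 0 < x then
    fLoop (PySem.Int.floordiv x 8) (l + 1) (m * PySem.Int.mod x 8)
  else (l, m)
termination_by x.toNat
decreasing_by
  rw [PySem.Int.floordiv_eq_ediv_of_pos (by norm_num)]
  omega

def f (x : Int) : Int × Int := fLoop x 0 1

-- ===== PORT B =====
-- digits of oct(x)[2:], most significant first (empty for x <= 0)
def octDigits (x : Int) : List Int :=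
  if h : 0 < x then
    octDigits (PySem.Int.floordiv x 8) ++ [PySem.Int.mod x 8]
  else []
termination_by x.toNat
decreasing_by
  rw [PySem.Int.floordiv_eq_ediv_of_pos (by norm_num)]
  omega

def f_alt (x : Int) : Int × Int :=
  if x ≤ 0 then (0, 1)
  else
    let s := octDigits x
    ((s.length : Int), s.foldl (· * ·) 1)

-- ===== PRECONDITION & SPEC =====
def Spec_f (x : Int) (out : Int × Int) : Prop := out = f_alt x
instance (x : Int) (out : Int × Int) : Decidable (Spec_f x out) := by unfold Spec_f; infer_instance

-- ===== CLAIM (what is proved, stated in full; the proofs are below) =====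
def Claim_equal_f : Prop := ∀ (x : Int), Dom_f x → Spec_f x (f x)

-- ===== LEMMAS AND PROOFS =====
theorem foldl_mul_eq (ds : List Int) (m : Int) : ds.foldl (· * ·) m = m * ds.prod := by
  induction ds generalizing m with
  | nil => simp
  | cons d ds ih => simp [List.foldl_cons, ih, List.prod_cons]; ring

theorem fLoop_eq (x l m : Int) :
    fLoop x l m = (l + ((octDigits x).length : Int), m * (octDigits x).prod) := by
  induction x, l, m using fLoop.induct with
  | case1 x l m h ih =>
    rw [fLoop, octDigits]
    simp only [h, dif_pos, ih]
    simp [List.prod_append]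
    constructor
    · ring
    · ring
  | case2 x l m h =>
    rw [fLoop, octDigits]
    simp [h]

theorem f_spec : Claim_equal_f := by
  intro x _
  unfold Spec_f f f_alt
  rw [fLoop_eq]
  by_cases h : x ≤ 0
  · rw [octDigits]
    have h2 : ¬ 0 < x := by omega
    simp [h, h2]
  · rw [if_neg h]
    show _ = ((((octDigits x).length : Int)), (octDigits x).foldl (· * ·) 1)
    rw [foldl_mul_eq]
    simp
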